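-- pv_equiv track=rewrite | github.com/alvintzhang/shortvslongreadprecision | querytable.py | extract_subreads
-- ===== SOURCE A (Python) =====
-- def extract_subreads(query_seq, start_positions, length, long_read_id, reference_positions):
--     subreads = []  # List to store subreads
--     used_positions = set()  # Track positions that have been used
--
--     for i, start_pos in enumerate(start_positions):
--         if start_pos is not None and start_pos not in used_positions and (start_pos + length <= len(query_seq)):
--             subread = query_seq[start_pos:start_pos + length]  # Extract subread
--             ref_start = reference_positions[i] if i < len(reference_positions) else None  # Reference start position
--             ref_end = reference_positions[i + length - 1] if i + length - 1 < len(reference_positions) else None  # Reference end position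
--             subread_id = f"{long_read_id}_subread_{i + 1}_start_{ref_start}_end_{ref_end}"  # Generate subread ID
--             subreads.append((subread, ref_start, ref_end, long_read_id, subread_id))  # Store subread information
--             used_positions.update(range(start_pos, start_pos + length))  # Mark positions as used
--
--     return subreads  # Return list of subreads
-- ===== SOURCE B (Python) =====
-- def extract_subreads(query_seq, start_positions, length, long_read_id, reference_positions):
--     # Two staged passes instead of A's single pass with a set of every covered position:
--     # pass 1 greedily SELECTS the accepted (index, start) pairs, keeping accepted starts
--     # in a sorted list and deciding "covered" by a binary search for the predecessor
--     # (the largest accepted start <= candidate): since all accepted intervals have the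
--     # same length, a candidate is covered iff that predecessor starts less than `length`
--     # before it.  Pass 2 materializes the records.  (Binary search is hand-written
--     # because module A imports nothing, so `bisect` is not available here.)
--     n = len(query_seq)
--     starts = []   # sorted list of accepted starts
--     chosen = []   # accepted (index, start) pairs in scan order
--
--     def bisect_right(a, x):
--         lo, hi = 0, len(a)
--         while lo < hi:
--             mid = (lo + hi) // 2
--             if a[mid] <= x:
--                 lo = mid + 1
--             else:
--                 hi = mid
--         return lo
--
--     for i, sp in enumerate(start_positions):
--         if sp is None or sp + length > n:
--             continue
--         j = bisect_right(starts, sp)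
--         if j > 0 and sp < starts[j - 1] + length:
--             continue  # covered by an earlier accepted subread
--         starts.insert(j, sp)
--         chosen.append((i, sp))
--
--     out = []
--     for i, sp in chosen:
--         subread = query_seq[sp:sp + length]
--         ref_start = reference_positions[i] if i < len(reference_positions) else None
--         ref_end = reference_positions[i + length - 1] if i + length - 1 < len(reference_positions) else None
--         out.append((subread, ref_start, ref_end, long_read_id,
--                     f"{long_read_id}_subread_{i + 1}_start_{ref_start}_end_{ref_end}"))
--     return out
-- ===== Notes on version B (the rewrite author's own statement) =====
-- stated objective: alternative
-- what changed: B splits the work into a selection pass and a materialization pass and replaces A's set that explodes every covered position via range(start, start+length) by a sorted list of accepted starts queried with a hand-written binary search for the predecessor (all intervals share one length, so a candidate is covered iff the largest accepted start <= it lies less than length before it).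
import Mathlib
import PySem

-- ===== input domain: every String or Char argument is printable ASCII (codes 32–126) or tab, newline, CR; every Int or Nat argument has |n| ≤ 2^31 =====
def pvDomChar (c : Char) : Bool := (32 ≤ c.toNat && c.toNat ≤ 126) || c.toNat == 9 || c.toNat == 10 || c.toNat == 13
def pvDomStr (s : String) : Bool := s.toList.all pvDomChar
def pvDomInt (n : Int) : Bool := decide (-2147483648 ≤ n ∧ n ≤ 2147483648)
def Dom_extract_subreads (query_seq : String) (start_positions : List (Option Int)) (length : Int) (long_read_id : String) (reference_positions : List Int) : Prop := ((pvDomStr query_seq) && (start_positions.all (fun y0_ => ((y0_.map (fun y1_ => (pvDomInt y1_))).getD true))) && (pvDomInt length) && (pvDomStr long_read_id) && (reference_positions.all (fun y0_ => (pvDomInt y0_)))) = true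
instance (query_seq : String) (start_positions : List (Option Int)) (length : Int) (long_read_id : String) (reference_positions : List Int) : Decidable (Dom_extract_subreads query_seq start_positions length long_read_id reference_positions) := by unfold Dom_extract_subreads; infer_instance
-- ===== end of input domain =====

-- B replaces A's single pass with a set exploding every covered position by two staged
-- passes: a selection pass keeping accepted starts in a sorted list queried by binary
-- search for the predecessor, then a pass materializing the records; return values
-- agree on all non-raising inputs (Pre_), proved below.

-- str(x) for x an int-or-None value (Python prints None as "None"); the record-building
-- lines are identical in both Pythons, so both ports share pvOptIntStr/pvRecord
def pvOptIntStr (o : Option Int) : String :=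
  match o with
  | none => "None"
  | some n => PySem.Int.toStr n

-- the accepted record for index i / start sp (identical lines in both Pythons; the
-- pyGetD defaults are only reached where Python raises IndexError, excluded by Pre_)
def pvRecord (query_seq : String) (length : Int) (long_read_id : String)
    (reference_positions : List Int) (i : Int) (sp : Int) :
    String × Option Int × Option Int × String × String :=
  let subread := PySem.Str.slice query_seq (some sp) (some (sp + length))
  let ref_start : Option Int :=
    if i < (reference_positions.length : Int) then
      some (PySem.List.pyGetD reference_positions i 0) else none
  let ref_end : Option Int :=
    if i + length - 1 < (reference_positions.length : Int) then
      some (PySem.List.pyGetD reference_positions (i + length - 1) 0) else none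
  let subread_id := long_read_id ++ "_subread_" ++ PySem.Int.toStr (i + 1) ++ "_start_" ++
    pvOptIntStr ref_start ++ "_end_" ++ pvOptIntStr ref_end
  (subread, ref_start, ref_end, long_read_id, subread_id)

-- ===== PORT A =====
-- loop body of A: state = (subreads, used_positions)
def pvStepA (query_seq : String) (length : Int) (long_read_id : String)
    (reference_positions : List Int)
    (st : List (String × Option Int × Option Int × String × String) × PySem.Set Int)
    (p : Int × Option Int) :
    List (String × Option Int × Option Int × String × String) × PySem.Set Int :=
  match p.2 with
  | none => st
  | some sp =>
      if !(PySem.Set.contains st.2 sp) && decide (sp + length ≤ PySem.Str.len query_seq) then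
        (st.1 ++ [pvRecord query_seq length long_read_id reference_positions p.1 sp],
         PySem.Set.update st.2 (PySem.List.pyRange sp (sp + length)))
      else st

def extract_subreads (query_seq : String) (start_positions : List (Option Int)) (length : Int) (long_read_id : String) (reference_positions : List Int) : List (String × Option Int × Option Int × String × String) :=
  ((PySem.List.enumerate start_positions).foldl
    (pvStepA query_seq length long_read_id reference_positions)
    ([], PySem.Set.empty)).1

-- ===== PORT B =====
-- Source B's hand-written bisect_right(a, x) (module A imports nothing, so Source B cannot use
-- the bisect module); lo/hi are nonnegative Python ints, so Nat with Nat division is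
-- exact for Python's (lo + hi) // 2
def pvBisect (a : List Int) (x : Int) (lo hi : Nat) : Nat :=
  if _h : lo < hi then
    if PySem.List.pyGetD a (((lo + hi) / 2 : Nat) : Int) 0 ≤ x then
      pvBisect a x ((lo + hi) / 2 + 1) hi
    else
      pvBisect a x lo ((lo + hi) / 2)
  else lo
termination_by hi - lo
decreasing_by all_goals omega

-- pass 1 of B: select the accepted (index, start) pairs, keeping the sorted list of
-- accepted starts; "covered" = the predecessor start lies less than `length` before sp
def pvSelect (query_seq : String) (length : Int) :
    List (Int × Option Int) → List Int → List (Int × Int)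
  | [], _ => []
  | p :: t, starts =>
    match p.2 with
    | none => pvSelect query_seq length t starts
    | some sp =>
      if decide (sp + length > PySem.Str.len query_seq) then
        pvSelect query_seq length t starts
      else
        let j := pvBisect starts sp 0 starts.length
        if decide (0 < j) && decide (sp < PySem.List.pyGetD starts ((j : Int) - 1) 0 + length) then
          pvSelect query_seq length t starts
        else
          (p.1, sp) :: pvSelect query_seq length t (PySem.List.insert starts (j : Int) sp)

-- pass 2 of B: materialize the record of each chosen pair
def extract_subreads_alt (query_seq : String) (start_positions : List (Option Int)) (length : Int) (long_read_id : String) (reference_positions : List Int) : List (String × Option Int × Option Int × String × String) :=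
  (pvSelect query_seq length (PySem.List.enumerate start_positions) []).map
    (fun p => pvRecord query_seq length long_read_id reference_positions p.1 p.2)

-- ===== PRECONDITION & SPEC =====
-- Pre_ excludes exactly the inputs on which A (and B) raise IndexError: a candidate at index k
-- that passes the None and length tests while k + length - 1 < -len(reference_positions)
-- makes Python index reference_positions with a negative index below -len (only reachable
-- for non-positive length, where used_positions stays empty, so this condition is exact).
def Pre_extract_subreads (query_seq : String) (start_positions : List (Option Int)) (length : Int) (long_read_id : String) (reference_positions : List Int) : Prop :=
  ∀ p ∈ PySem.List.enumerate start_positions, ∀ sp ∈ p.2.toList,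
    sp + length ≤ PySem.Str.len query_seq → -(reference_positions.length : Int) ≤ p.1 + length - 1
instance (query_seq : String) (start_positions : List (Option Int)) (length : Int) (long_read_id : String) (reference_positions : List Int) : Decidable (Pre_extract_subreads query_seq start_positions length long_read_id reference_positions) := by unfold Pre_extract_subreads; infer_instance

def pvWitness_extract_subreads : String × List (Option Int) × Int × String × List Int :=
  ("ACGTA", [some 0, some 1, none, some 3], 2, "read1", [10, 11, 12, 13])

def Spec_extract_subreads (query_seq : String) (start_positions : List (Option Int)) (length : Int) (long_read_id : String) (reference_positions : List Int) (out : List (String × Option Int × Option Int × String × String)) : Prop := out = extract_subreads_alt query_seq start_positions length long_read_id reference_positions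
instance (query_seq : String) (start_positions : List (Option Int)) (length : Int) (long_read_id : String) (reference_positions : List Int) (out : List (String × Option Int × Option Int × String × String)) : Decidable (Spec_extract_subreads query_seq start_positions length long_read_id reference_positions out) := by unfold Spec_extract_subreads; infer_instance

-- ===== CLAIM (what is proved, stated in full; the proofs are below) =====
def Claim_equal_extract_subreads : Prop := ∀ (query_seq : String) (start_positions : List (Option Int)) (length : Int) (long_read_id : String) (reference_positions : List Int), Dom_extract_subreads query_seq start_positions length long_read_id reference_positions → Pre_extract_subreads query_seq start_positions length long_read_id reference_positions → Spec_extract_subreads query_seq start_positions length long_read_id reference_positions (extract_subreads query_seq start_positions length long_read_id reference_positions)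

-- ===== LEMMAS AND PROOFS =====

-- Source B's binary search returns the split point of a sorted list: everything strictly
-- below it is ≤ x, everything from it on is > x
theorem pvBisect_spec (a : List Int) (x : Int) (lo hi : Nat)
    (hhi : hi ≤ a.length) (hlohi : lo ≤ hi) (hs : a.Pairwise (· ≤ ·))
    (hlo : ∀ k (_hk : k < a.length), k < lo → a[k] ≤ x)
    (hup : ∀ k (_hk : k < a.length), hi ≤ k → x < a[k]) :
    lo ≤ pvBisect a x lo hi ∧ pvBisect a x lo hi ≤ hi ∧
    (∀ k (_hk : k < a.length), k < pvBisect a x lo hi → a[k] ≤ x) ∧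
    (∀ k (_hk : k < a.length), pvBisect a x lo hi ≤ k → x < a[k]) := by
  rw [pvBisect]
  split
  · rename_i h
    have hmlo : lo ≤ (lo + hi) / 2 := by omega
    have hmhi : (lo + hi) / 2 < hi := by omega
    have hmlen : (lo + hi) / 2 < a.length := by omega
    rw [PySem.List.pyGetD_natCast, List.getD_eq_getElem a 0 hmlen]
    split
    · rename_i hle
      have ih := pvBisect_spec a x ((lo + hi) / 2 + 1) hi hhi (by omega) hs
        (fun k hk hklt => by
          rcases lt_or_ge k lo with h' | h'
          · exact hlo k hk h'
          · rcases eq_or_lt_of_le (Nat.lt_succ_iff.mp hklt) with rfl | hlt'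
            · exact hle
            · exact le_trans (List.pairwise_iff_getElem.mp hs k _ hk hmlen hlt') hle)
        hup
      obtain ⟨i1, i2, i3, i4⟩ := ih
      exact ⟨by omega, i2, i3, i4⟩
    · rename_i hgt
      have ih := pvBisect_spec a x lo ((lo + hi) / 2) (by omega) hmlo hs hlo
        (fun k hk hge => by
          rcases eq_or_lt_of_le hge with rfl | hlt'
          · exact lt_of_not_ge hgt
          · exact lt_of_lt_of_le (lt_of_not_ge hgt)
              (List.pairwise_iff_getElem.mp hs _ k hmlen hk hlt'))
      obtain ⟨i1, i2, i3, i4⟩ := ih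
      exact ⟨i1, by omega, i3, i4⟩
  · exact ⟨le_refl lo, hlohi, hlo, fun k hk hgk => hup k hk (by omega)⟩
termination_by hi - lo
decreasing_by all_goals omega

-- B's covered test (predecessor found by binary search starts < length before the
-- candidate) decides exactly "some accepted interval covers the candidate"
theorem pvCovered_iff (a : List Int) (L x : Int) (hs : a.Pairwise (· ≤ ·)) :
    ((decide (0 < pvBisect a x 0 a.length) &&
      decide (x < PySem.List.pyGetD a ((pvBisect a x 0 a.length : Int) - 1) 0 + L)) = true)
    ↔ ∃ s ∈ a, s ≤ x ∧ x < s + L := by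
  obtain ⟨-, hjle, hbelow, habove⟩ :=
    pvBisect_spec a x 0 a.length (le_refl _) (Nat.zero_le _) hs
      (fun k _ h => absurd h (Nat.not_lt_zero k)) (fun k hk h => absurd hk (not_lt.mpr h))
  set j := pvBisect a x 0 a.length with hj
  simp only [Bool.and_eq_true, decide_eq_true_eq]
  constructor
  · rintro ⟨hjpos, hpred⟩
    have hj1 : j - 1 < a.length := by omega
    have hcast : (j : Int) - 1 = ((j - 1 : Nat) : Int) := by omega
    rw [hcast, PySem.List.pyGetD_natCast, List.getD_eq_getElem a 0 hj1] at hpred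
    exact ⟨a[j - 1], List.getElem_mem hj1, hbelow (j - 1) hj1 (by omega), hpred⟩
  · rintro ⟨s, hmem, hsx, hxl⟩
    obtain ⟨k, hk, rfl⟩ := List.mem_iff_getElem.mp hmem
    have hkj : k < j := by
      by_contra h
      exact absurd hsx (not_le.mpr (habove k hk (le_of_not_gt h)))
    have hjpos : 0 < j := by omega
    have hj1 : j - 1 < a.length := by omega
    have hcast : (j : Int) - 1 = ((j - 1 : Nat) : Int) := by omega
    rw [hcast, PySem.List.pyGetD_natCast, List.getD_eq_getElem a 0 hj1]
    refine ⟨hjpos, lt_of_lt_of_le hxl ?_⟩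
    have hk1 : k ≤ j - 1 := by omega
    rcases eq_or_lt_of_le hk1 with h' | h'
    · subst h'; exact le_refl _
    · have := List.pairwise_iff_getElem.mp hs k (j - 1) hk hj1 h'
      omega

-- membership in the list Source B's starts.insert(j, sp) builds
theorem pvInsert_mem (a : List Int) (x y : Int) (j : Nat) :
    y ∈ a.take j ++ x :: a.drop j ↔ y ∈ a ∨ y = x := by
  conv_rhs => rw [← List.take_append_drop j a]
  simp only [List.mem_append, List.mem_cons]
  tauto

-- Source B's starts.insert(j, sp) at the binary-search split point keeps the list sorted
theorem pvInsert_sorted (a : List Int) (x : Int) (j : Nat)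
    (h1 : ∀ k (_hk : k < a.length), k < j → a[k] ≤ x)
    (h2 : ∀ k (_hk : k < a.length), j ≤ k → x < a[k])
    (hs : a.Pairwise (· ≤ ·)) :
    (a.take j ++ x :: a.drop j).Pairwise (· ≤ ·) := by
  rw [List.pairwise_append]
  refine ⟨hs.sublist (List.take_sublist j a), ?_, ?_⟩
  · rw [List.pairwise_cons]
    refine ⟨?_, hs.sublist (List.drop_sublist j a)⟩
    intro y hy
    obtain ⟨m, hm, rfl⟩ := List.mem_iff_getElem.mp hy
    have hd : j + m < a.length := by simp only [List.length_drop] at hm; omega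
    rw [List.getElem_drop]
    exact le_of_lt (h2 (j + m) hd (Nat.le_add_right j m))
  · intro u hu v hv
    obtain ⟨m, hm, rfl⟩ := List.mem_iff_getElem.mp hu
    have hm2 : m < j ∧ m < a.length := by simpa using hm
    rw [List.getElem_take]
    rcases List.mem_cons.mp hv with rfl | hv'
    · exact h1 m hm2.2 hm2.1
    · obtain ⟨m', hm', rfl⟩ := List.mem_iff_getElem.mp hv'
      have hd : j + m' < a.length := by simp only [List.length_drop] at hm'; omega
      rw [List.getElem_drop]
      exact le_trans (h1 m hm2.2 hm2.1) (le_of_lt (h2 (j + m') hd (by omega)))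

-- one unfolded step of A's loop on a some-candidate
theorem pvStepA_eq (query_seq : String) (length : Int) (long_read_id : String)
    (reference_positions : List Int)
    (acc : List (String × Option Int × Option Int × String × String))
    (used : PySem.Set Int) (p : Int × Option Int) (sp : Int) (hp : p.2 = some sp) :
    pvStepA query_seq length long_read_id reference_positions (acc, used) p =
      if !(PySem.Set.contains used sp) && decide (sp + length ≤ PySem.Str.len query_seq) then
        (acc ++ [pvRecord query_seq length long_read_id reference_positions p.1 sp],
         PySem.Set.update used (PySem.List.pyRange sp (sp + length)))
      else (acc, used) := by
  simp only [pvStepA, hp]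

-- the bridge: A's fold over the candidates equals acc ++ the records of B's selection,
-- whenever B's sorted start list describes exactly A's set of covered positions
theorem pvFold_eq (query_seq : String) (length : Int) (long_read_id : String)
    (reference_positions : List Int) (l : List (Int × Option Int))
    (acc : List (String × Option Int × Option Int × String × String))
    (used : PySem.Set Int) (starts : List Int)
    (hs : starts.Pairwise (· ≤ ·))
    (hinv : ∀ x : Int, x ∈ used ↔ ∃ s ∈ starts, s ≤ x ∧ x < s + length) :
    (l.foldl (pvStepA query_seq length long_read_id reference_positions) (acc, used)).1 =
    acc ++ (pvSelect query_seq length l starts).map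
      (fun p => pvRecord query_seq length long_read_id reference_positions p.1 p.2) := by
  induction l generalizing acc used starts with
  | nil => simp [pvSelect]
  | cons p t ih =>
      simp only [List.foldl_cons]
      match hp : p.2 with
      | none =>
          rw [show pvStepA query_seq length long_read_id reference_positions (acc, used) p
                = (acc, used) by simp only [pvStepA, hp]]
          simpa only [pvSelect, hp] using ih acc used starts hs hinv
      | some sp =>
          rw [pvStepA_eq query_seq length long_read_id reference_positions acc used p sp hp]
          simp only [pvSelect, hp]
          by_cases hlen : sp + length ≤ PySem.Str.len query_seq
          · have e1 : decide (sp + length > PySem.Str.len query_seq) = false :=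
              decide_eq_false (not_lt.mpr hlen)
            have e2 : decide (sp + length ≤ PySem.Str.len query_seq) = true :=
              decide_eq_true hlen
            have hcov := pvCovered_iff starts length sp hs
            by_cases hused : sp ∈ used
            · have hcont : PySem.Set.contains used sp = true :=
                (PySem.Set.contains_iff used sp).mpr hused
              have hcb : (decide (0 < pvBisect starts sp 0 starts.length) &&
                  decide (sp < PySem.List.pyGetD starts
                    ((pvBisect starts sp 0 starts.length : Int) - 1) 0 + length)) = true :=
                hcov.mpr ((hinv sp).mp hused)
              simp only [e1, e2, hcont, hcb, Bool.not_true, Bool.false_and,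
                Bool.false_eq_true, if_false, if_true]
              exact ih acc used starts hs hinv
            · have hcont : PySem.Set.contains used sp = false :=
                Bool.eq_false_iff.mpr (fun hc => hused ((PySem.Set.contains_iff used sp).mp hc))
              have hcb : (decide (0 < pvBisect starts sp 0 starts.length) &&
                  decide (sp < PySem.List.pyGetD starts
                    ((pvBisect starts sp 0 starts.length : Int) - 1) 0 + length)) = false := by
                rw [Bool.eq_false_iff]
                intro hc
                exact hused ((hinv sp).mpr (hcov.mp hc))
              simp only [e1, e2, hcont, hcb, Bool.not_false, Bool.true_and,
                Bool.false_eq_true, if_false, if_true]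
              obtain ⟨-, hjle, hbelow, habove⟩ :=
                pvBisect_spec starts sp 0 starts.length (le_refl _) (Nat.zero_le _) hs
                  (fun k _ h => absurd h (Nat.not_lt_zero k))
                  (fun k hk h => absurd hk (not_lt.mpr h))
              set j := pvBisect starts sp 0 starts.length with hj
              have hins : PySem.List.insert starts (j : Int) sp
                  = starts.take j ++ sp :: starts.drop j :=
                PySem.List.insert_natCast starts j sp hjle
              have hs' : (PySem.List.insert starts (j : Int) sp).Pairwise (· ≤ ·) := by
                rw [hins]; exact pvInsert_sorted starts sp j hbelow habove hs
              have hinv' : ∀ x : Int,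
                  x ∈ PySem.Set.update used (PySem.List.pyRange sp (sp + length)) ↔
                  ∃ s ∈ PySem.List.insert starts (j : Int) sp, s ≤ x ∧ x < s + length := by
                intro x
                rw [PySem.Set.mem_update, hinv x, hins]
                simp only [PySem.List.mem_pyRange_one]
                constructor
                · rintro (⟨s, hsm, h1, h2⟩ | ⟨h1, h2⟩)
                  · exact ⟨s, (pvInsert_mem starts sp s j).mpr (Or.inl hsm), h1, h2⟩
                  · exact ⟨sp, (pvInsert_mem starts sp sp j).mpr (Or.inr rfl), h1, h2⟩
                · rintro ⟨s, hsm, h1, h2⟩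
                  rcases (pvInsert_mem starts sp s j).mp hsm with hsm' | rfl
                  · exact Or.inl ⟨s, hsm', h1, h2⟩
                  · exact Or.inr ⟨h1, h2⟩
              rw [ih (acc ++ [pvRecord query_seq length long_read_id reference_positions p.1 sp])
                    _ _ hs' hinv']
              simp
          · have e1 : decide (sp + length > PySem.Str.len query_seq) = true :=
              decide_eq_true (lt_of_not_ge hlen)
            have e2 : decide (sp + length ≤ PySem.Str.len query_seq) = false :=
              decide_eq_false hlen
            simp only [e1, e2, Bool.and_false, Bool.false_eq_true,
              if_false, if_true]
            exact ih acc used starts hs hinv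

-- ===== VERDICT (by name: the statement is the Claim_ definition above) =====
theorem extract_subreads_spec : Claim_equal_extract_subreads := by
  intro query_seq start_positions length long_read_id reference_positions _ _
  unfold Spec_extract_subreads extract_subreads extract_subreads_alt
  rw [pvFold_eq query_seq length long_read_id reference_positions _ [] PySem.Set.empty []
    List.Pairwise.nil (by intro x; simp [PySem.Set.empty])]
  rfl
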